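-- pv_equiv track=rewrite | github.com/Ekedani/decision-theory-labs | lab-3/main.py | calculate_sevidge
-- ===== SOURCE A (Python) =====
-- def calculate_sevidge(matrix):
--     """
--     Розраховує критерій Севіджа.
--     Для кожного стовпця знаходиться максимальне значення, а потім для кожного елемента
--     обчислюється 'жалю' як різниця: max_j - a_ij.
--     Критерій для альтернативи – максимальне значення жалю по всіх станах.
--     Повертає список значень критерію для кожної альтернативи.
--     """
--     if not matrix or not matrix[0]:
--         return []
--     num_alts = len(matrix)
--     num_states = len(matrix[0])
--     max_in_states = [max(matrix[i][j] for i in range(num_alts)) for j in range(num_states)]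
--     sevidge_values = []
--     for i in range(num_alts):
--         regrets = [max_in_states[j] - matrix[i][j] for j in range(num_states)]
--         sevidge_values.append(max(regrets))
--     return sevidge_values
-- ===== SOURCE B (Python) =====
-- def calculate_sevidge(matrix):
--     """Savage criterion via one column-major pass keeping a running per-row regret maximum."""
--     if not matrix or not matrix[0]:
--         return []
--     sevidge = [0] * len(matrix)
--     for j in range(len(matrix[0])):
--         col_max = max(row[j] for row in matrix)
--         sevidge = [max(s, col_max - row[j]) for s, row in zip(sevidge, matrix)]
--     return sevidge
-- ===== Notes on version B (the rewrite author's own statement) =====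
-- stated objective: alternative
-- what changed: Instead of precomputing the list of all column maxima and then building a per-row regret list and taking its max (two row-major passes with intermediate lists), B does one column-major pass keeping a running per-alternative regret maximum updated pointwise per state.
import Mathlib
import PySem

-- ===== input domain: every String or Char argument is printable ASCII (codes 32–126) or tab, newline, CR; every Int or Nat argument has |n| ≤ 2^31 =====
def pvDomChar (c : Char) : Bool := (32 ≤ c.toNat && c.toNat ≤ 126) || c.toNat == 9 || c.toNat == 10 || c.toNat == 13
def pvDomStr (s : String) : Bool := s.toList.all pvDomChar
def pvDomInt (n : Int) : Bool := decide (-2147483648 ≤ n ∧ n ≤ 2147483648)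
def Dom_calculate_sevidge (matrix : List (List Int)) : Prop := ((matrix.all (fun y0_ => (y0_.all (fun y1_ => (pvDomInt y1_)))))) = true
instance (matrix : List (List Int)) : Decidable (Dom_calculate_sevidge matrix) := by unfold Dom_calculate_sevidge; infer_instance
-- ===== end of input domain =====

-- B replaces A's two row-major passes (precomputed column maxima, then per-row regret lists)
-- by a single column-major fold that keeps a running per-alternative regret maximum (objective: alternative).

-- ===== PORT A =====
def calculate_sevidge (matrix : List (List Int)) : List Int :=
  match matrix with
  | [] => []
  | r0 :: rest =>
    if r0.isEmpty then []
    else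
      let num_alts : Int := ((r0 :: rest).length : Int)
      let num_states : Int := (r0.length : Int)
      let max_in_states :=
        (PySem.List.pyRange 0 num_states 1).map (fun j =>
          (PySem.List.max?
              ((PySem.List.pyRange 0 num_alts 1).map (fun i =>
                PySem.List.pyGetD (PySem.List.pyGetD (r0 :: rest) i []) j 0))
              (fun x => x)).getD 0)
      (PySem.List.pyRange 0 num_alts 1).map (fun i =>
        let regrets := (PySem.List.pyRange 0 num_states 1).map (fun j =>
          PySem.List.pyGetD max_in_states j 0 -
            PySem.List.pyGetD (PySem.List.pyGetD (r0 :: rest) i []) j 0)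
        (PySem.List.max? regrets (fun x => x)).getD 0)

-- ===== PORT B =====
def calculate_sevidge_alt (matrix : List (List Int)) : List Int :=
  match matrix with
  | [] => []
  | r0 :: rest =>
    if r0.isEmpty then []
    else
      (PySem.List.pyRange 0 (r0.length : Int) 1).foldl
        (fun sevidge j =>
          let col_max :=
            (PySem.List.max? ((r0 :: rest).map (fun row => PySem.List.pyGetD row j 0))
              (fun x => x)).getD 0
          (sevidge.zip (r0 :: rest)).map (fun p => max p.1 (col_max - PySem.List.pyGetD p.2 j 0)))
        ((r0 :: rest).map (fun _ => (0 : Int)))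

-- ===== PRECONDITION & SPEC =====
-- Pre_ excludes only ragged matrices whose first row is longer than some other row:
-- there the Python A raises IndexError while indexing matrix[i][j].
def Pre_calculate_sevidge (matrix : List (List Int)) : Prop :=
  ∀ row ∈ matrix, (matrix.headD []).length ≤ row.length
instance (matrix : List (List Int)) : Decidable (Pre_calculate_sevidge matrix) := by
  unfold Pre_calculate_sevidge; infer_instance
def pvWitness_calculate_sevidge : List (List Int) := [[1, 2], [3, 0]]

def Spec_calculate_sevidge (matrix : List (List Int)) (out : List Int) : Prop := out = calculate_sevidge_alt matrix
instance (matrix : List (List Int)) (out : List Int) : Decidable (Spec_calculate_sevidge matrix out) := by unfold Spec_calculate_sevidge; infer_instance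

-- ===== CLAIM (what is proved, stated in full; the proofs are below) =====
def Claim_equal_calculate_sevidge : Prop := ∀ (matrix : List (List Int)), Dom_calculate_sevidge matrix → Pre_calculate_sevidge matrix → Spec_calculate_sevidge matrix (calculate_sevidge matrix)

-- ===== LEMMAS AND PROOFS =====

-- indexing a list by the full range 0..len and applying f is mapping f
theorem map_pyRange_len {α β : Type} (xs : List α) (d : α) (f : α → β) :
    (PySem.List.pyRange 0 (xs.length : Int) 1).map
        (fun i => f (PySem.List.pyGetD xs i d)) = xs.map f := by
  conv_rhs => rw [← PySem.List.map_pyGetD_pyRange_zero' (xs := xs) (d := d)]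
  rw [List.map_map]
  rfl

theorem zip_map_left (h' : Int × List Int → Int) :
    ∀ (acc : List Int) (rows : List (List Int)), acc.length = rows.length →
      ((acc.zip rows).map (fun p => h' p)).zip rows
        = (acc.zip rows).map (fun p => (h' p, p.2)) := by
  intro acc
  induction acc with
  | nil => intro rows _; simp
  | cons a acc ih =>
    intro rows h
    cases rows with
    | nil => simp at h
    | cons r rows =>
      simp only [List.zip_cons_cons, List.map_cons]
      rw [ih rows (by simpa using h)]

theorem foldl_zip_map (g : Int → List Int → Int → Int) (js : List Int) :
    ∀ (acc : List Int) (rows : List (List Int)), acc.length = rows.length →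
      js.foldl (fun a j => (a.zip rows).map (fun p => g p.1 p.2 j)) acc
        = (acc.zip rows).map (fun p => js.foldl (fun s j => g s p.2 j) p.1) := by
  induction js with
  | nil =>
    intro acc rows h
    simp only [List.foldl_nil]
    exact (List.map_fst_zip (le_of_eq h)).symm
  | cons j js ih =>
    intro acc rows h
    simp only [List.foldl_cons]
    rw [ih ((acc.zip rows).map (fun p => g p.1 p.2 j)) rows (by simp [h])]
    rw [zip_map_left (fun p => g p.1 p.2 j) acc rows h, List.map_map]
    rfl

theorem map_const_zip (xs : List (List Int)) :
    (xs.map (fun _ => (0 : Int))).zip xs = xs.map (fun r => ((0 : Int), r)) := by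
  induction xs with
  | nil => rfl
  | cons x xs ih => simp only [List.map_cons, List.zip_cons_cons, ih]

-- every column entry is at most the column maximum
theorem colmax_ge (rows : List (List Int)) (row : List Int) (hm : row ∈ rows) (j : Int) :
    PySem.List.pyGetD row j 0 ≤
      (PySem.List.max? (rows.map (fun r => PySem.List.pyGetD r j 0)) (fun x => x)).getD 0 := by
  have hmem : PySem.List.pyGetD row j 0 ∈ rows.map (fun r => PySem.List.pyGetD r j 0) :=
    List.mem_map.mpr ⟨row, hm, rfl⟩
  cases h : PySem.List.max? (rows.map (fun r => PySem.List.pyGetD r j 0)) (fun x => x) with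
  | none =>
    rw [PySem.List.max?_eq_none_iff] at h
    rw [h] at hmem
    simp at hmem
  | some m =>
    simpa using PySem.List.max?_isMax h _ hmem

-- max of a nonempty list of values whose first element is nonnegative
-- equals the running max started at 0
theorem max_getD_eq_foldl (ns : Int) (hns : 0 < ns) (f : Int → Int) (h0 : 0 ≤ f 0) :
    ((PySem.List.max? ((PySem.List.pyRange 0 ns 1).map f) (fun x => x)).getD 0)
      = (PySem.List.pyRange 0 ns 1).foldl (fun s j => max s (f j)) 0 := by
  rw [PySem.List.pyRange_one_cons hns]
  simp only [List.map_cons, List.foldl_cons]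
  rw [PySem.List.max?_id_cons]
  simp only [Option.getD_some]
  rw [List.foldl_map]
  congr 1
  omega

-- ===== VERDICT (by name: the statement is the Claim_ definition above) =====
theorem calculate_sevidge_spec : Claim_equal_calculate_sevidge := by
  intro matrix _ hpre
  unfold Spec_calculate_sevidge
  cases matrix with
  | nil => rfl
  | cons r0 rest =>
    by_cases h0 : r0 = []
    · subst h0; simp [calculate_sevidge, calculate_sevidge_alt]
    · have hne : r0.isEmpty = false := by simpa [List.isEmpty_iff] using h0
      have hns : (0 : Int) < (r0.length : Int) := by
        have := List.length_pos_of_ne_nil h0; exact_mod_cast this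
      -- abbreviations
      set rows := r0 :: rest with hrows
      set ns : Int := (r0.length : Int) with hnsdef
      -- the column maximum, shared by both sides after normalisation
      set cm : Int → Int := fun j =>
        (PySem.List.max? (rows.map (fun r => PySem.List.pyGetD r j 0)) (fun x => x)).getD 0
        with hcm
      -- normalise A
      have hA : calculate_sevidge (r0 :: rest)
          = rows.map (fun row =>
              (PySem.List.max? ((PySem.List.pyRange 0 ns 1).map
                  (fun j => cm j - PySem.List.pyGetD row j 0)) (fun x => x)).getD 0) := by
        simp only [calculate_sevidge, hne, Bool.false_eq_true, if_false]
        rw [map_pyRange_len rows ([] : List Int)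
          (fun row =>
            (PySem.List.max? ((PySem.List.pyRange 0 ns 1).map (fun j =>
              PySem.List.pyGetD ((PySem.List.pyRange 0 ns 1).map (fun j' =>
                (PySem.List.max? ((PySem.List.pyRange 0 ((rows.length : Int)) 1).map (fun i =>
                  PySem.List.pyGetD (PySem.List.pyGetD rows i []) j' 0)) (fun x => x)).getD 0)) j 0 -
              PySem.List.pyGetD row j 0)) (fun x => x)).getD 0)]
        apply List.map_congr_left
        intro row _
        congr 1
        congr 1
        apply List.map_congr_left
        intro j hj
        have hj' := (PySem.List.mem_pyRange_one).1 hj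
        rw [PySem.List.pyGetD_map_pyRange_of_nonneg _ ns j 0 hj'.1 hj'.2]
        rw [map_pyRange_len rows ([] : List Int) (fun r => PySem.List.pyGetD r j 0)]
      -- normalise B
      have hB : calculate_sevidge_alt (r0 :: rest)
          = rows.map (fun row =>
              (PySem.List.pyRange 0 ns 1).foldl
                (fun s j => max s (cm j - PySem.List.pyGetD row j 0)) 0) := by
        simp only [calculate_sevidge_alt, hne, Bool.false_eq_true, if_false]
        rw [foldl_zip_map (fun s row j => max s (cm j - PySem.List.pyGetD row j 0))
          (PySem.List.pyRange 0 ns 1) (rows.map (fun _ => (0 : Int))) rows (by simp)]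
        rw [map_const_zip rows, List.map_map]
        rfl
      rw [hA, hB]
      apply List.map_congr_left
      intro row hrow
      have hrow' : row ∈ rows := hrow
      have hle : PySem.List.pyGetD row 0 0 ≤ cm 0 := colmax_ge rows row hrow' 0
      exact max_getD_eq_foldl ns hns (fun j => cm j - PySem.List.pyGetD row j 0)
        (by simpa using sub_nonneg.mpr hle)
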